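-- pv_equiv track=rewrite | github.com/linhdvu14/cp-sols | sols/CodeForces/1861_edu/B_Two_Binary_Strings.py | solve
-- ===== SOURCE A (Python) =====
-- def solve(A, B):
--     if A[0] != B[0] or A[-1] != B[-1]: return 'NO'
--     if A[0] == A[-1]: return 'YES'
--
--     N = len(A)
--
--     L = [0] * N + [1]
--     for i in range(N):
--         a, b = A[i], B[i]
--         if a == b: L[i] = L[i - 1]
--         if a == b == A[0]: L[i] = 1
--
--     R = [0] * N + [1]
--     for i in range(N - 1, -1, -1):
--         a, b = A[i], B[i]
--         if a == b: R[i] = R[i + 1]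
--         if a == b == A[-1]: R[i] = 1
--
--     for i in range(N):
--         if L[i] and R[i + 1]:
--             return 'YES'
--
--     return 'NO'
-- ===== SOURCE B (Python) =====
-- def solve(A, B):
--     if A[0] != B[0] or A[-1] != B[-1]: return 'NO'
--     if A[0] == A[-1]: return 'YES'
--     seen = False
--     for a, b in zip(A, B):
--         if a != b:
--             seen = False
--         elif a == A[0]:
--             seen = True
--         elif a == A[-1] and seen:
--             return 'YES'
--     return 'NO'
-- ===== Notes on version B (the rewrite author's own statement) =====
-- stated objective: simpler
-- what changed: Replaced the two DP arrays L/R plus the final split-point scan by a single forward pass over zip(A,B) maintaining one boolean flag (an A[0]-match seen since the last mismatch), returning YES at an A[-1]-match while the flag is set.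
import Mathlib
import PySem

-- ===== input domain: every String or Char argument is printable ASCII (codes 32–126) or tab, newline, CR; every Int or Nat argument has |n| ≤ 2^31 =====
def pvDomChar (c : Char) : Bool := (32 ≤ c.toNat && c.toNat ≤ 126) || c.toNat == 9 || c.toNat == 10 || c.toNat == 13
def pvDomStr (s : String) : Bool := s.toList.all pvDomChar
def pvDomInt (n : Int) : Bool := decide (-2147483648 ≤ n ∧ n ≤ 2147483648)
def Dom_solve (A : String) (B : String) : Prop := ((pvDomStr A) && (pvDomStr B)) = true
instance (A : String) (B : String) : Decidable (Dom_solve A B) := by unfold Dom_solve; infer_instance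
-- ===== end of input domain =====

-- B replaces A's two DP arrays and split-point scan by one forward pass with a single boolean flag (simpler, O(1) extra space).

-- ===== PORT A =====
-- the final 'for i in range(N): if L[i] and R[i+1]: return YES' early-return loop of A
def solveScan (L R : List Int) : List Int → String
  | [] => "NO"
  | i :: rest =>
    if PySem.List.pyGetD L i 0 ≠ 0 ∧ PySem.List.pyGetD R (i + 1) 0 ≠ 0 then "YES"
    else solveScan L R rest

-- literal port of A; where Python raises (empty A/B, or B shorter than A inside the loops) the
-- total pyGetD default is read instead — those inputs are excluded by Pre_solve.
def solve (A : String) (B : String) : String :=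
  let As := A.toList
  let Bs := B.toList
  let a0 := PySem.List.pyGetD As 0 ' '
  let b0 := PySem.List.pyGetD Bs 0 ' '
  let an := PySem.List.pyGetD As (-1) ' '
  let bn := PySem.List.pyGetD Bs (-1) ' '
  if a0 ≠ b0 ∨ an ≠ bn then "NO"
  else if a0 = an then "YES"
  else
    let N : Nat := As.length
    let L0 : List Int := List.replicate N 0 ++ [1]
    let L := (PySem.List.pyRange 0 (N : Int) 1).foldl (fun L i =>
      let a := PySem.List.pyGetD As i ' '
      let b := PySem.List.pyGetD Bs i ' '
      let L1 := if a = b then PySem.List.pySetD L i (PySem.List.pyGetD L (i - 1) 0) else L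
      if a = b ∧ a = a0 then PySem.List.pySetD L1 i 1 else L1) L0
    let R0 : List Int := List.replicate N 0 ++ [1]
    let R := (PySem.List.pyRange ((N : Int) - 1) (-1) (-1)).foldl (fun R i =>
      let a := PySem.List.pyGetD As i ' '
      let b := PySem.List.pyGetD Bs i ' '
      let R1 := if a = b then PySem.List.pySetD R i (PySem.List.pyGetD R (i + 1) 0) else R
      if a = b ∧ a = an then PySem.List.pySetD R1 i 1 else R1) R0
    solveScan L R (PySem.List.pyRange 0 (N : Int) 1)

-- ===== PORT B =====
-- B's single forward pass: flag 'seen' = an A[0]-match seen since the last mismatch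
def altLoop (a0 an : Char) : List (Char × Char) → Bool → String
  | [], _ => "NO"
  | (a, b) :: rest, seen =>
    if a ≠ b then altLoop a0 an rest false
    else if a = a0 then altLoop a0 an rest true
    else if a = an ∧ seen then "YES"
    else altLoop a0 an rest seen

def solve_alt (A : String) (B : String) : String :=
  let As := A.toList
  let Bs := B.toList
  let a0 := PySem.List.pyGetD As 0 ' '
  let b0 := PySem.List.pyGetD Bs 0 ' '
  let an := PySem.List.pyGetD As (-1) ' '
  let bn := PySem.List.pyGetD Bs (-1) ' '
  if a0 ≠ b0 ∨ an ≠ bn then "NO"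
  else if a0 = an then "YES"
  else altLoop a0 an (As.zip Bs) false

-- ===== PRECONDITION & SPEC =====
-- Pre_solve excludes exactly the inputs on which Python A raises IndexError: an empty A or B
-- (indexing A[0]/B[0]/A[-1]/B[-1]), and, when both guards fall through, a B shorter than A
-- (indexing B[i] for i up to len(A)-1 inside the loops).
def Pre_solve (A : String) (B : String) : Prop :=
  A.toList ≠ [] ∧ B.toList ≠ [] ∧
  ((A.toList.head? = B.toList.head? ∧ A.toList.getLast? = B.toList.getLast? ∧
      A.toList.head? ≠ A.toList.getLast?) → A.toList.length ≤ B.toList.length)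
instance (A : String) (B : String) : Decidable (Pre_solve A B) := by unfold Pre_solve; infer_instance

def pvWitness_solve : String × String := ("0110", "0101")

def Spec_solve (A : String) (B : String) (out : String) : Prop := out = solve_alt A B
instance (A : String) (B : String) (out : String) : Decidable (Spec_solve A B out) := by unfold Spec_solve; infer_instance

-- ===== CLAIM (what is proved, stated in full; the proofs are below) =====
def Claim_equal_solve : Prop := ∀ (A : String) (B : String), Dom_solve A B → Pre_solve A B → Spec_solve A B (solve A B)

-- ===== LEMMAS AND PROOFS =====

-- the per-position transition of B's flag (= the recurrence of A's array L)
def pvStep (a0 : Char) (s : Bool) (p : Char × Char) : Bool :=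
  if p.1 ≠ p.2 then false else if p.1 = a0 then true else s

-- the recurrence of A's array R read from position i rightwards
def pvRc (an : Char) : List (Char × Char) → Bool
  | [] => true
  | p :: rest => if p.1 ≠ p.2 then false else if p.1 = an then true else pvRc an rest

-- ---- generic decomposition helpers ----

theorem pv_cons_eq_append_cons {α : Type} (x : α) (l : List α) (C : List α → α → List α → Prop) :
    (∃ U p V, x :: l = U ++ p :: V ∧ C U p V) ↔
      (C [] x l ∨ ∃ U p V, l = U ++ p :: V ∧ C (x :: U) p V) := by
  constructor
  · rintro ⟨U, p, V, hEq, hC⟩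
    cases U with
    | nil => simp only [List.nil_append, List.cons.injEq] at hEq; left; rw [hEq.1, hEq.2]; exact hC
    | cons u U' =>
      simp only [List.cons_append, List.cons.injEq] at hEq
      right; exact ⟨U', p, V, hEq.2, hEq.1 ▸ hC⟩
  · rintro (hC | ⟨U, p, V, hEq, hC⟩)
    · exact ⟨[], x, l, rfl, hC⟩
    · exact ⟨x :: U, p, V, by rw [hEq]; rfl, hC⟩

theorem pv_set_append_length {α : Type} (pre : List α) (x v : α) (post : List α) :
    (pre ++ x :: post).set pre.length v = pre ++ v :: post := by
  induction pre with
  | nil => rfl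
  | cons a pre ih => simp [ih]

-- ---- characterisations of B's loop ----

theorem altLoop_eq_yes_iff (a0 an : Char) (hne : a0 ≠ an) :
    ∀ (Q : List (Char × Char)) (s : Bool),
      altLoop a0 an Q s = "YES" ↔
        ∃ U p V, Q = U ++ p :: V ∧ U.foldl (pvStep a0) s = true ∧ p.1 = p.2 ∧ p.1 = an := by
  intro Q
  induction Q with
  | nil =>
    intro s
    constructor
    · intro h; exact absurd h (by simp [altLoop])
    · rintro ⟨U, p, V, hEq, -⟩; exact absurd hEq (by simp)
  | cons q rest ih =>
    intro s; obtain ⟨a, b⟩ := q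
    rw [pv_cons_eq_append_cons (a, b) rest
      (fun U p V => U.foldl (pvStep a0) s = true ∧ p.1 = p.2 ∧ p.1 = an)]
    simp only [List.foldl_cons, List.foldl_nil]
    by_cases hab : a = b
    · subst hab
      by_cases ha0 : a = a0
      · have hstepv : pvStep a0 s (a, a) = true := by simp [pvStep, ha0]
        have hL : altLoop a0 an ((a, a) :: rest) s = altLoop a0 an rest true := by
          simp [altLoop, ha0]
        rw [hL, ih true, hstepv]
        constructor
        · rintro ⟨U, p, V, h1, h2, h3, h4⟩; right; exact ⟨U, p, V, h1, h2, h3, h4⟩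
        · rintro (⟨-, -, han⟩ | h)
          · exact absurd (ha0 ▸ han) hne
          · exact h
      · by_cases han : a = an
        · cases s with
          | true =>
            have hL : altLoop a0 an ((a, a) :: rest) true = "YES" := by
              simp [altLoop, han, Ne.symm hne]
            rw [hL]
            constructor
            · intro _; left; exact ⟨rfl, rfl, han⟩
            · intro _; rfl
          | false =>
            have hL : altLoop a0 an ((a, a) :: rest) false = altLoop a0 an rest false := by
              simp [altLoop, han, Ne.symm hne]
            have hstepv : pvStep a0 false (a, a) = false := by simp [pvStep, ha0]
            rw [hL, ih false, hstepv]
            constructor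
            · intro h; right; exact h
            · rintro (⟨hfalse, -, -⟩ | h)
              · exact absurd hfalse (by simp)
              · exact h
        · have hL : altLoop a0 an ((a, a) :: rest) s = altLoop a0 an rest s := by
            simp [altLoop, ha0, han]
          have hstepv : pvStep a0 s (a, a) = s := by simp [pvStep, ha0]
          rw [hL, ih s, hstepv]
          constructor
          · intro h; right; exact h
          · rintro (⟨-, -, han'⟩ | h)
            · exact absurd han' han
            · exact h
    · have hL : altLoop a0 an ((a, b) :: rest) s = altLoop a0 an rest false := by
        simp [altLoop, hab]
      have hstepv : pvStep a0 s (a, b) = false := by simp [pvStep, hab]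
      rw [hL, ih false, hstepv]
      constructor
      · intro h; right; exact h
      · rintro (⟨-, hab', -⟩ | h)
        · exact absurd hab' hab
        · exact h

theorem altLoop_yes_or_no (a0 an : Char) :
    ∀ (Q : List (Char × Char)) (s : Bool), altLoop a0 an Q s = "YES" ∨ altLoop a0 an Q s = "NO" := by
  intro Q
  induction Q with
  | nil => intro s; right; rfl
  | cons p rest ih =>
    intro s; obtain ⟨a, b⟩ := p
    simp only [altLoop]
    split_ifs <;> first | exact ih _ | exact Or.inl rfl

-- ---- characterisations of A's machinery ----

theorem pvRc_eq_true_iff (an : Char) :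
    ∀ (V : List (Char × Char)),
      pvRc an V = true ↔
        (∀ p ∈ V, p.1 = p.2) ∨
          ∃ V1 p V2, V = V1 ++ p :: V2 ∧ (∀ q ∈ V1, q.1 = q.2) ∧ p.1 = p.2 ∧ p.1 = an := by
  intro V
  induction V with
  | nil =>
    constructor
    · intro _; left; intro p hp; exact absurd hp (List.not_mem_nil)
    · intro _; rfl
  | cons q rest ih =>
    obtain ⟨a, b⟩ := q
    have hdecomp := pv_cons_eq_append_cons (a, b) rest
      (fun V1 p V2 => (∀ q ∈ V1, q.1 = q.2) ∧ p.1 = p.2 ∧ p.1 = an)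
    by_cases hab : a = b
    · subst hab
      by_cases han : a = an
      · have hrc : pvRc an ((a, a) :: rest) = true := by simp [pvRc, han]
        rw [hrc]
        constructor
        · intro _
          right
          exact ⟨[], (a, a), rest, rfl, by simp, rfl, han⟩
        · intro _; rfl
      · have hrc : pvRc an ((a, a) :: rest) = pvRc an rest := by simp [pvRc, han]
        rw [hrc, ih, hdecomp]
        constructor
        · rintro (hall | ⟨V1, p, V2, h1, h2, h3, h4⟩)
          · left; intro p hp
            rcases List.mem_cons.mp hp with h | h
            · rw [h]
            · exact hall p h
          · right; right
            refine ⟨V1, p, V2, h1, ?_, h3, h4⟩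
            intro q hq
            rcases List.mem_cons.mp hq with h | h
            · rw [h]
            · exact h2 q h
        · rintro (hall | (⟨-, -, han'⟩ | ⟨V1, p, V2, h1, h2, h3, h4⟩))
          · left; intro p hp; exact hall p (List.mem_cons_of_mem _ hp)
          · exact absurd han' han
          · right
            exact ⟨V1, p, V2, h1, fun q hq => h2 q (List.mem_cons_of_mem _ hq), h3, h4⟩
    · have hrc : pvRc an ((a, b) :: rest) = false := by simp [pvRc, hab]
      rw [hrc, hdecomp]
      constructor
      · intro h; exact absurd h (by simp)
      · rintro (hall | (⟨-, hab', -⟩ | ⟨V1, p, V2, h1, h2, h3, h4⟩))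
        · exact absurd (hall (a, b) (List.mem_cons_self ..)) hab
        · exact absurd hab' hab
        · exact absurd (h2 (a, b) (List.mem_cons_self ..)) hab

theorem foldl_pvStep_all_match (a0 : Char) :
    ∀ (Q : List (Char × Char)), (∀ p ∈ Q, p.1 = p.2) → Q.foldl (pvStep a0) true = true := by
  intro Q
  induction Q with
  | nil => intro _; rfl
  | cons p rest ih =>
    intro h
    have hp : p.1 = p.2 := h p (List.mem_cons_self ..)
    have := fun q hq => h q (List.mem_cons_of_mem _ hq)
    simp only [List.foldl_cons, pvStep, hp]
    split_ifs <;> [simp_all; exact ih this; exact ih this]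

-- with a (a0,a0) head, the initial flag is irrelevant
theorem foldl_pvStep_init (a0 : Char) (U' : List (Char × Char)) (s : Bool) :
    ((a0, a0) :: U').foldl (pvStep a0) s = U'.foldl (pvStep a0) true := by
  simp [pvStep]

-- ---- the glue: A's split-point existential ↔ B's flag existential ----

-- a nonempty prefix of a list headed by (a0,a0) is itself headed by (a0,a0)
theorem pv_head_of_append (a0 : Char) (P U rest : List (Char × Char))
    (h : P = U ++ rest) (hhead : P.head? = some (a0, a0)) (hU : U ≠ []) :
    ∃ U'', U = (a0, a0) :: U'' := by
  cases U with
  | nil => exact absurd rfl hU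
  | cons u U'' =>
    refine ⟨U'', ?_⟩
    have : u = (a0, a0) := by
      have := hhead
      rw [h] at this
      simpa using this
    rw [this]

-- reading the flag through a final an-position
theorem pv_lc_concat (a0 an : Char) (hne : a0 ≠ an) (U1 : List (Char × Char)) (x : Char × Char)
    (hx : x.1 = an) (h : (U1 ++ [x]).foldl (pvStep a0) true = true) :
    x.1 = x.2 ∧ U1.foldl (pvStep a0) true = true := by
  rw [List.foldl_append] at h
  have hxa0 : x.1 ≠ a0 := by rw [hx]; exact fun hh => hne hh.symm
  by_cases hm : x.1 = x.2
  · refine ⟨hm, ?_⟩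
    simp only [List.foldl, pvStep] at h
    rw [if_neg (not_not_intro hm), if_neg hxa0] at h
    exact h
  · exfalso
    simp [List.foldl, pvStep, hm] at h

theorem pv_main_iff (a0 an : Char) (hne : a0 ≠ an) (P : List (Char × Char)) (pn : Char × Char)
    (hhead : P.head? = some (a0, a0)) (hlast : P.getLast? = some pn) (hpan : pn.1 = an) :
    (∃ U V, P = U ++ V ∧ U ≠ [] ∧ U.foldl (pvStep a0) true = true ∧ pvRc an V = true) ↔
      (∃ U p V, P = U ++ p :: V ∧ U.foldl (pvStep a0) false = true ∧ p.1 = p.2 ∧ p.1 = an) := by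
  constructor
  · rintro ⟨U, V, hEq, hU, hlc, hrc⟩
    obtain ⟨U'', hU''⟩ := pv_head_of_append a0 P U V hEq hhead hU
    rcases (pvRc_eq_true_iff an V).mp hrc with hall | ⟨V1, p, V2, hV, hV1, hpm, hpan'⟩
    · rcases List.eq_nil_or_concat V with hVnil | ⟨V1, x, hVc⟩
      · -- V = [] : P = U ends in pn with pn.1 = an
        subst hVnil
        rw [List.append_nil] at hEq
        rcases List.eq_nil_or_concat U with hUnil | ⟨U1, x, hUc⟩
        · exact absurd hUnil hU
        · rw [List.concat_eq_append] at hUc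
          have hlx : P.getLast? = some x := by rw [hEq, hUc]; simp
          have hxpn : pn = x := Option.some.inj (hlast.symm.trans hlx)
          have hxan : x.1 = an := by rw [← hxpn]; exact hpan
          rw [hUc] at hlc
          obtain ⟨hpm2, hlc1⟩ := pv_lc_concat a0 an hne U1 x hxan hlc
          have hU1ne : U1 ≠ [] := by
            intro hnil
            rw [hnil, List.nil_append] at hUc
            rw [hEq, hUc] at hhead
            simp at hhead
            have hx0 : x.1 = a0 := by rw [hhead]
            rw [hx0] at hxan
            exact hne hxan
          obtain ⟨U1'', hU1''⟩ :=
            pv_head_of_append a0 P U1 [x] (by rw [hEq, hUc]) hhead hU1ne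
          refine ⟨U1, x, [], by rw [hEq, hUc], ?_, hpm2, hxan⟩
          rw [hU1'', foldl_pvStep_init]
          rw [hU1'', foldl_pvStep_init] at hlc1
          exact hlc1
      · -- V = V1 ++ [x] : x is the last of P and matches
        rw [List.concat_eq_append] at hVc
        have hlx : P.getLast? = some x := by
          rw [hEq, hVc, ← List.append_assoc, ← List.concat_eq_append,
            List.concat_eq_append]
          exact List.getLast?_concat
        have hxpn : pn = x := Option.some.inj (hlast.symm.trans hlx)
        have hxan : x.1 = an := by rw [← hxpn]; exact hpan
        refine ⟨U ++ V1, x, [], by rw [hEq, hVc, List.append_assoc], ?_, ?_, hxan⟩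
        · rw [List.foldl_append, hU'', foldl_pvStep_init]
          rw [hU'', foldl_pvStep_init] at hlc
          rw [hlc]
          exact foldl_pvStep_all_match a0 V1
            (fun q hq => hall q (by rw [hVc]; exact List.mem_append_left _ hq))
        · exact hall x (by rw [hVc]; exact List.mem_append_right _ (by simp))
    · -- an an-match inside V
      refine ⟨U ++ V1, p, V2, by rw [hEq, hV, List.append_assoc], ?_, hpm, hpan'⟩
      rw [List.foldl_append, hU'', foldl_pvStep_init]
      rw [hU'', foldl_pvStep_init] at hlc
      rw [hlc]
      exact foldl_pvStep_all_match a0 V1 hV1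
  · rintro ⟨U, p, V, hEq, hflag, hmatch, hpan'⟩
    have hUne : U ≠ [] := by
      intro hnil
      rw [hnil, List.nil_append] at hEq
      rw [hEq] at hhead
      simp at hhead
      have hp0 : p.1 = a0 := by rw [hhead]
      rw [hp0] at hpan'
      exact hne hpan'
    obtain ⟨U'', hU''⟩ := pv_head_of_append a0 P U (p :: V) hEq hhead hUne
    refine ⟨U, p :: V, hEq, hUne, ?_, ?_⟩
    · rw [hU'', foldl_pvStep_init]
      rw [hU'', foldl_pvStep_init] at hflag
      exact hflag
    · simp only [pvRc]
      rw [if_neg (not_not_intro hmatch), if_pos hpan']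

-- ---- A's final scan as an existential ----

theorem solveScan_eq (L R : List Int) :
    ∀ idx : List Int, solveScan L R idx =
      if ∃ i ∈ idx, PySem.List.pyGetD L i 0 ≠ 0 ∧ PySem.List.pyGetD R (i + 1) 0 ≠ 0
      then "YES" else "NO" := by
  intro idx
  induction idx with
  | nil => simp [solveScan]
  | cons i rest ih =>
    simp only [solveScan]
    by_cases h : PySem.List.pyGetD L i 0 ≠ 0 ∧ PySem.List.pyGetD R (i + 1) 0 ≠ 0
    · rw [if_pos h, if_pos ⟨i, List.mem_cons_self .., h⟩]
    · have hiff : (∃ j ∈ i :: rest, PySem.List.pyGetD L j 0 ≠ 0 ∧ PySem.List.pyGetD R (j + 1) 0 ≠ 0) ↔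
          (∃ j ∈ rest, PySem.List.pyGetD L j 0 ≠ 0 ∧ PySem.List.pyGetD R (j + 1) 0 ≠ 0) := by
        constructor
        · rintro ⟨j, hj, hC⟩
          rcases List.mem_cons.mp hj with rfl | hj'
          · exact absurd hC h
          · exact ⟨j, hj', hC⟩
        · rintro ⟨j, hj, hC⟩
          exact ⟨j, List.mem_cons_of_mem _ hj, hC⟩
      rw [if_neg h, ih]
      simp only [hiff]

theorem pv_exists_range (N : Nat) (C : Int → Prop) :
    (∃ i ∈ PySem.List.pyRange 0 (N : Int) 1, C i) ↔ (∃ k : Nat, k < N ∧ C (k : Int)) := by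
  constructor
  · rintro ⟨i, hi, hC⟩
    rw [PySem.List.mem_pyRange_one] at hi
    refine ⟨i.toNat, by omega, ?_⟩
    rwa [Int.toNat_of_nonneg hi.1]
  · rintro ⟨k, hk, hC⟩
    refine ⟨(k : Int), ?_, hC⟩
    rw [PySem.List.mem_pyRange_one]
    omega

-- reading one entry of '(range N).map f ++ [1]'
theorem pv_read (N : Nat) (f : Nat → Int) (k : Nat) (hk : k ≤ N) :
    PySem.List.pyGetD ((List.range N).map f ++ [1]) (k : Int) 0 = if k < N then f k else 1 := by
  rw [PySem.List.pyGetD_natCast]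
  rcases lt_or_eq_of_le hk with h | h
  · rw [if_pos h]
    rw [List.getD_eq_getElem _ _ (by simp; omega)]
    rw [List.getElem_append_left (by simpa using h)]
    simp
  · subst h
    rw [if_neg (lt_irrefl _)]
    rw [List.getD_eq_getElem _ _ (by simp)]
    rw [List.getElem_append_right (by simp)]
    simp

-- ---- the L loop builds the table of B's flag values ----

theorem pv_Lfold (As Bs : List Char) (a0 : Char) (hlen : As.length ≤ Bs.length)
    (n : Nat) (hn : n ≤ As.length) :
    (PySem.List.pyRange 0 (n : Int) 1).foldl
      (fun L i =>
        let a := PySem.List.pyGetD As i ' '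
        let b := PySem.List.pyGetD Bs i ' '
        let L1 := if a = b then PySem.List.pySetD L i (PySem.List.pyGetD L (i - 1) 0) else L
        if a = b ∧ a = a0 then PySem.List.pySetD L1 i 1 else L1)
      (List.replicate As.length 0 ++ [1])
    = (List.range n).map
        (fun i => if ((As.zip Bs).take (i + 1)).foldl (pvStep a0) true = true then (1 : Int) else 0)
      ++ List.replicate (As.length - n) 0 ++ [1] := by
  induction n with
  | zero => simp [PySem.List.pyRange_one_eq_nil]
  | succ k ih =>
    have hk : k ≤ As.length := Nat.le_of_succ_le hn
    have hkN : k < As.length := hn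
    have hkB : k < Bs.length := lt_of_lt_of_le hkN hlen
    have hkP : k < (As.zip Bs).length := by simp [List.length_zip]; omega
    rw [show ((k + 1 : Nat) : Int) = (k : Int) + 1 by push_cast; ring]
    rw [PySem.List.pyRange_one_succ_right (by positivity)]
    rw [List.foldl_append, ih hk]
    simp only [List.foldl_cons, List.foldl_nil]
    -- the state before step k
    set f : Nat → Int :=
      fun i => if ((As.zip Bs).take (i + 1)).foldl (pvStep a0) true = true then (1 : Int) else 0
      with hf
    have hmaplen : ((List.range k).map f).length = k := by simp
    have hreps : List.replicate (As.length - k) (0 : Int) = 0 :: List.replicate (As.length - (k + 1)) 0 := by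
      rw [show As.length - k = (As.length - (k + 1)) + 1 by omega, List.replicate_succ]

    have ha : PySem.List.pyGetD As (k : Int) ' ' = As[k] := by
      rw [PySem.List.pyGetD_natCast, List.getD_eq_getElem _ _ hkN]
    have hb : PySem.List.pyGetD Bs (k : Int) ' ' = Bs[k] := by
      rw [PySem.List.pyGetD_natCast, List.getD_eq_getElem _ _ hkB]
    have hprev : PySem.List.pyGetD
        ((List.range k).map f ++ List.replicate (As.length - k) 0 ++ [1]) ((k : Int) - 1) 0 =
        if ((As.zip Bs).take k).foldl (pvStep a0) true = true then (1 : Int) else 0 := by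
      cases k with
      | zero =>
        simp only [Nat.cast_zero, zero_sub, List.range_zero, List.map_nil, List.nil_append]
        rw [PySem.List.pyGetD_neg_one_append_singleton]
        simp
      | succ j =>
        rw [show ((j + 1 : Nat) : Int) - 1 = (j : Int) by push_cast; ring]
        rw [PySem.List.pyGetD_natCast]
        rw [List.getD_eq_getElem?_getD]
        rw [List.append_assoc]
        rw [List.getElem?_append_left (by simp)]
        simp [hf]
    have hset' : ∀ (w v : Int) (tail : List Int),
        (List.map f (List.range k) ++ w :: tail).set k v =
        List.map f (List.range k) ++ v :: tail := by
      intro w v tail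
      have h := pv_set_append_length (List.map f (List.range k)) w v tail
      rwa [hmaplen] at h
    have hsetv : ∀ v : Int,
        ((List.range k).map f ++ List.replicate (As.length - k) 0 ++ [1]).set k v =
          (List.range k).map f ++ v :: (List.replicate (As.length - (k + 1)) 0 ++ [1]) := by
      intro v
      rw [hreps, List.append_assoc, List.cons_append]
      exact hset' 0 v _
    have hPk : (As.zip Bs)[k] = (As[k], Bs[k]) := List.getElem_zip ..
    have htake : (As.zip Bs).take (k + 1) = (As.zip Bs).take k ++ [(As[k], Bs[k])] := by
      rw [List.take_succ]
      congr 1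
      rw [List.getElem?_eq_getElem hkP, hPk]
      rfl
    have hrange : (List.range (k + 1)).map f = (List.range k).map f ++ [f k] := by
      rw [List.range_succ, List.map_append]
      rfl
    simp only [ha, hb, hprev]
    by_cases h1 : As[k] = Bs[k]
    · by_cases h2 : As[k] = a0
      · have hflag : ((As.zip Bs).take (k + 1)).foldl (pvStep a0) true = true := by
          rw [htake, List.foldl_append]
          simp only [List.foldl_cons, List.foldl_nil, pvStep]
          rw [if_neg (not_not_intro h1), if_pos h2]
        have hfk : f k = 1 := by simp only [hf]; rw [if_pos hflag]
        rw [if_pos h1, if_pos ⟨h1, h2⟩]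
        rw [PySem.List.pySetD_natCast, PySem.List.pySetD_natCast]
        rw [hsetv, hset']
        rw [hrange, hfk]
        simp
      · have hstepv : ((As.zip Bs).take (k + 1)).foldl (pvStep a0) true =
            ((As.zip Bs).take k).foldl (pvStep a0) true := by
          rw [htake, List.foldl_append]
          simp only [List.foldl_cons, List.foldl_nil, pvStep]
          rw [if_neg (not_not_intro h1), if_neg h2]
        have hfk : f k = if ((As.zip Bs).take k).foldl (pvStep a0) true = true then (1 : Int) else 0 := by
          simp only [hf, hstepv]
        rw [if_pos h1, if_neg (by tauto)]
        rw [PySem.List.pySetD_natCast, hsetv]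
        rw [hrange, hfk]
        simp
    · have hstepv : ((As.zip Bs).take (k + 1)).foldl (pvStep a0) true = false := by
        rw [htake, List.foldl_append]
        simp only [List.foldl_cons, List.foldl_nil, pvStep]
        rw [if_pos h1]
      have hfk : f k = 0 := by simp [hf, hstepv]
      rw [if_neg h1, if_neg (by tauto)]
      rw [hrange, hfk, hreps]
      simp


-- ---- the R loop builds the table of pvRc values ----

theorem pv_Rfold (As Bs : List Char) (an : Char) (hlen : As.length ≤ Bs.length)
    (m : Nat) (hm : m ≤ As.length) :
    (PySem.List.pyRange ((m : Int) - 1) (-1) (-1)).foldl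
      (fun R i =>
        let a := PySem.List.pyGetD As i ' '
        let b := PySem.List.pyGetD Bs i ' '
        let R1 := if a = b then PySem.List.pySetD R i (PySem.List.pyGetD R (i + 1) 0) else R
        if a = b ∧ a = an then PySem.List.pySetD R1 i 1 else R1)
      (List.replicate m 0 ++ (List.range (As.length - m)).map
        (fun j => if pvRc an ((As.zip Bs).drop (m + j)) = true then (1 : Int) else 0) ++ [1])
    = (List.range As.length).map
        (fun j => if pvRc an ((As.zip Bs).drop j) = true then (1 : Int) else 0) ++ [1] := by
  have hPlen : (As.zip Bs).length = As.length := by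
    rw [List.length_zip]; omega
  induction m with
  | zero =>
    rw [PySem.List.pyRange_neg_one_eq_nil (by omega)]
    simp
  | succ m ih =>
    have hmN : m < As.length := hm
    have hmB : m < Bs.length := lt_of_lt_of_le hmN hlen
    have hmP : m < (As.zip Bs).length := by rw [hPlen]; exact hmN
    rw [show ((m + 1 : Nat) : Int) - 1 = ((m : Nat) : Int) by push_cast; ring]
    set body : List Int → Int → List Int := (fun R i =>
      let a := PySem.List.pyGetD As i ' '
      let b := PySem.List.pyGetD Bs i ' '
      let R1 := if a = b then PySem.List.pySetD R i (PySem.List.pyGetD R (i + 1) 0) else R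
      if a = b ∧ a = an then PySem.List.pySetD R1 i 1 else R1) with hbody
    rw [PySem.List.pyRange_neg_one_cons (by omega), List.foldl_cons]
    set g : Nat → Int :=
      fun j => if pvRc an ((As.zip Bs).drop j) = true then (1 : Int) else 0 with hg
    have hgm : ∀ t, (fun j => if pvRc an ((As.zip Bs).drop (t + j)) = true then (1 : Int) else 0) =
        fun j => g (t + j) := by intro t; rfl
    have ha : PySem.List.pyGetD As ((m : Nat) : Int) ' ' = As[m] := by
      rw [PySem.List.pyGetD_natCast, List.getD_eq_getElem _ _ hmN]
    have hb : PySem.List.pyGetD Bs ((m : Nat) : Int) ' ' = Bs[m] := by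
      rw [PySem.List.pyGetD_natCast, List.getD_eq_getElem _ _ hmB]
    have hnext : PySem.List.pyGetD
        (List.replicate (m + 1) 0 ++ (List.range (As.length - (m + 1))).map
          (fun j => if pvRc an ((As.zip Bs).drop (m + 1 + j)) = true then (1 : Int) else 0) ++ [1])
        (((m : Nat) : Int) + 1) 0 = if pvRc an ((As.zip Bs).drop (m + 1)) = true then (1 : Int) else 0 := by
      rw [show ((m : Nat) : Int) + 1 = ((m + 1 : Nat) : Int) by push_cast; ring]
      rw [PySem.List.pyGetD_natCast, List.getD_eq_getElem?_getD, List.append_assoc]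
      rw [List.getElem?_append_right (by simp)]
      simp only [List.length_replicate, Nat.sub_self]
      by_cases hN1 : As.length - (m + 1) = 0
      · have hdropnil : (As.zip Bs).drop (m + 1) = [] :=
          List.drop_eq_nil_of_le (by omega)
        rw [hdropnil]
        rw [hN1]
        simp [pvRc]
      · rw [List.getElem?_append_left (by simp; omega)]
        rw [List.getElem?_map]
        rw [List.getElem?_range (by omega)]
        simp
    have hrepl : List.replicate (m + 1) (0 : Int) = List.replicate m 0 ++ [0] :=
      List.replicate_succ' ..
    have hmaplen : (List.replicate m (0 : Int)).length = m := by simp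
    have hset' : ∀ (w v : Int) (tail : List Int),
        (List.replicate m (0 : Int) ++ w :: tail).set m v =
        List.replicate m (0 : Int) ++ v :: tail := by
      intro w v tail
      have h := pv_set_append_length (List.replicate m (0 : Int)) w v tail
      rwa [hmaplen] at h
    have hSshape :
        List.replicate (m + 1) 0 ++ ((List.range (As.length - (m + 1))).map
          (fun j => if pvRc an ((As.zip Bs).drop (m + 1 + j)) = true then (1 : Int) else 0) ++ [1]) =
        List.replicate m (0 : Int) ++ 0 :: ((List.range (As.length - (m + 1))).map
          (fun j => if pvRc an ((As.zip Bs).drop (m + 1 + j)) = true then (1 : Int) else 0) ++ [1]) := by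
      rw [hrepl, List.append_assoc, List.cons_append, List.nil_append]
    have hdrop : (As.zip Bs).drop m = (As[m], Bs[m]) :: (As.zip Bs).drop (m + 1) := by
      rw [List.drop_eq_getElem_cons hmP, List.getElem_zip]
    have hmapm : (List.range (As.length - m)).map (fun j => g (m + j)) =
        g m :: (List.range (As.length - (m + 1))).map
          (fun j => if pvRc an ((As.zip Bs).drop (m + 1 + j)) = true then (1 : Int) else 0) := by
      rw [show As.length - m = (As.length - (m + 1)) + 1 by omega]
      rw [List.range_succ_eq_map, List.map_cons, List.map_map]
      have hcomp : ((fun j => g (m + j)) ∘ Nat.succ) =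
          (fun j => if pvRc an ((As.zip Bs).drop (m + 1 + j)) = true then (1 : Int) else 0) := by
        funext j
        simp only [Function.comp_apply, Nat.succ_eq_add_one, hg]
        rw [show m + (j + 1) = m + 1 + j by omega]
      rw [hcomp, Nat.add_zero]
    -- evaluate the step at index m, reaching the state for m
    have hstepstate :
        body
          (List.replicate (m + 1) 0 ++ (List.range (As.length - (m + 1))).map
            (fun j => if pvRc an ((As.zip Bs).drop (m + 1 + j)) = true then (1 : Int) else 0) ++ [1])
          ((m : Nat) : Int) =
        List.replicate m 0 ++ (List.range (As.length - m)).map (fun j => g (m + j)) ++ [1] := by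
      rw [hbody]
      simp only [ha, hb, hnext]
      rw [hmapm]
      rw [List.append_assoc, List.append_assoc, List.cons_append]
      by_cases h1 : As[m] = Bs[m]
      · by_cases h2 : As[m] = an
        · have hrc : pvRc an ((As.zip Bs).drop m) = true := by
            rw [hdrop]
            simp only [pvRc]
            rw [if_neg (not_not_intro h1), if_pos h2]
          have hgv : g m = 1 := by simp only [hg]; rw [if_pos hrc]
          rw [if_pos h1, if_pos ⟨h1, h2⟩]
          rw [PySem.List.pySetD_natCast, PySem.List.pySetD_natCast]
          rw [hSshape, hset', hset', hgv]
        · have hrc : pvRc an ((As.zip Bs).drop m) = pvRc an ((As.zip Bs).drop (m + 1)) := by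
            rw [hdrop]
            simp only [pvRc]
            rw [if_neg (not_not_intro h1), if_neg h2]
          have hgv : g m = if pvRc an ((As.zip Bs).drop (m + 1)) = true then (1 : Int) else 0 := by
            simp only [hg, hrc]
          rw [if_pos h1, if_neg (by tauto)]
          rw [PySem.List.pySetD_natCast]
          rw [hSshape, hset', hgv]
        -- mismatch: nothing is written
      · have hrc : pvRc an ((As.zip Bs).drop m) = false := by
          rw [hdrop]
          simp only [pvRc]
          rw [if_pos h1]
        have hgv : g m = 0 := by simp [hg, hrc]
        rw [if_neg h1, if_neg (by tauto)]
        rw [hSshape, hgv]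
    rw [hstepstate]
    rw [hgm m] at ih
    exact ih (by omega)

-- ---- index form of A's split-point condition vs append form ----

theorem pv_ne_zero_iff (c : Prop) [Decidable c] : (if c then (1 : Int) else 0) ≠ 0 ↔ c := by
  split_ifs with h <;> simp [h]

theorem pv_idx_append (a0 an : Char) (P : List (Char × Char)) :
    (∃ k : Nat, k < P.length ∧ (P.take (k + 1)).foldl (pvStep a0) true = true ∧
        pvRc an (P.drop (k + 1)) = true) ↔
      (∃ U V, P = U ++ V ∧ U ≠ [] ∧ U.foldl (pvStep a0) true = true ∧ pvRc an V = true) := by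
  constructor
  · rintro ⟨k, hk, h1, h2⟩
    refine ⟨P.take (k + 1), P.drop (k + 1), (List.take_append_drop _ _).symm, ?_, h1, h2⟩
    have hlen : (P.take (k + 1)).length = k + 1 := by rw [List.length_take]; omega
    intro hnil
    rw [hnil] at hlen
    simp at hlen
  · rintro ⟨U, V, hEq, hU, h1, h2⟩
    have hUlen : 1 ≤ U.length := List.length_pos_iff.mpr hU
    refine ⟨U.length - 1, ?_, ?_, ?_⟩
    · rw [hEq, List.length_append]; omega
    · rw [show U.length - 1 + 1 = U.length by omega, hEq, List.take_left]; exact h1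
    · rw [show U.length - 1 + 1 = U.length by omega, hEq, List.drop_left]; exact h2

-- ===== VERDICT (by name: the statement is the Claim_ definition above) =====
theorem solve_spec : Claim_equal_solve := by
  intro A B hdom hpre
  obtain ⟨hA, hB, hlenC⟩ := hpre
  unfold Spec_solve
  simp only [solve, solve_alt]
  set As := A.toList with hAs
  set Bs := B.toList with hBs
  set a0t := PySem.List.pyGetD As 0 ' ' with ha0t
  set b0t := PySem.List.pyGetD Bs 0 ' ' with hb0t
  set ant := PySem.List.pyGetD As (-1) ' ' with hant
  set bnt := PySem.List.pyGetD Bs (-1) ' ' with hbnt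
  by_cases hg1 : a0t ≠ b0t ∨ ant ≠ bnt
  · rw [if_pos hg1, if_pos hg1]
  · rw [if_neg hg1, if_neg hg1]
    push_neg at hg1
    obtain ⟨hg1a, hg1b⟩ := hg1
    by_cases hg2 : a0t = ant
    · rw [if_pos hg2, if_pos hg2]
    · rw [if_neg hg2, if_neg hg2]
      -- main branch
      obtain ⟨a, As₂, hAcons⟩ := List.exists_cons_of_ne_nil hA
      obtain ⟨b, Bs₂, hBcons⟩ := List.exists_cons_of_ne_nil hB
      have h0A : a0t = a := by rw [ha0t, hAcons, PySem.List.pyGetD_zero_cons]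
      have h0B : b0t = b := by rw [hb0t, hBcons, PySem.List.pyGetD_zero_cons]
      have hanA : ant = As.getLast hA := by rw [hant, PySem.List.pyGetD_neg_one As ' ' hA]
      have hbnB : bnt = Bs.getLast hB := by rw [hbnt, PySem.List.pyGetD_neg_one Bs ' ' hB]
      have hheads : As.head? = some a := by rw [hAcons]; rfl
      have hheadsB : Bs.head? = some b := by rw [hBcons]; rfl
      have hlasts : As.getLast? = some (As.getLast hA) := List.getLast?_eq_getLast ..
      have hlastsB : Bs.getLast? = some (Bs.getLast hB) := List.getLast?_eq_getLast ..
      have hlen : As.length ≤ Bs.length := by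
        apply hlenC
        refine ⟨?_, ?_, ?_⟩
        · rw [hheads, hheadsB]
          exact congrArg some (by rw [← h0A, ← h0B]; exact hg1a)
        · rw [hlasts, hlastsB]
          exact congrArg some (by rw [← hanA, ← hbnB]; exact hg1b)
        · rw [hheads, hlasts]
          intro hcontra
          exact hg2 (by rw [h0A, hanA]; exact Option.some.inj hcontra)
      have hNpos : 0 < As.length := by rw [hAcons]; simp
      have hPlen : (As.zip Bs).length = As.length := by rw [List.length_zip]; omega
      have hPne : (As.zip Bs) ≠ [] := by
        intro h
        have hl : (As.zip Bs).length = 0 := by rw [h]; rfl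
        rw [hPlen] at hl
        omega
      have hba : b = a := by rw [← h0B, ← hg1a, h0A]
      have hheadP : (As.zip Bs).head? = some (a0t, a0t) := by
        rw [hAcons, hBcons, List.zip_cons_cons, List.head?_cons, hba, h0A]
      set pn := (As.zip Bs).getLast hPne with hpn
      have hlastP : (As.zip Bs).getLast? = some pn := List.getLast?_eq_getLast ..
      have hkzip : As.length - 1 < (As.zip Bs).length := by omega
      have hpnget : pn = (As.zip Bs)[As.length - 1]'hkzip := by
        have h1 : (As.zip Bs)[(As.zip Bs).length - 1]? = some pn := by
          rw [← List.getLast?_eq_getElem?]; exact hlastP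
        rw [hPlen] at h1
        rw [List.getElem?_eq_getElem hkzip] at h1
        exact (Option.some.inj h1).symm
      have hpn1 : pn.1 = ant := by
        rw [hpnget, List.getElem_zip]
        rw [hanA, List.getLast_eq_getElem]
      -- rewrite the two loop results
      have hL := pv_Lfold As Bs a0t hlen As.length le_rfl
      rw [Nat.sub_self] at hL
      simp only [List.replicate_zero, List.append_nil] at hL
      have hR' := pv_Rfold As Bs ant hlen As.length le_rfl
      rw [Nat.sub_self] at hR'
      simp only [List.range_zero, List.map_nil, List.append_nil] at hR'
      rw [hL, hR']
      rw [solveScan_eq]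
      -- turn the scan condition into the Nat-indexed condition
      have hcondiff : (∃ i ∈ PySem.List.pyRange 0 (As.length : Int) 1,
          PySem.List.pyGetD ((List.range As.length).map
            (fun i => if ((As.zip Bs).take (i + 1)).foldl (pvStep a0t) true = true
              then (1 : Int) else 0) ++ [1]) i 0 ≠ 0 ∧
          PySem.List.pyGetD ((List.range As.length).map
            (fun j => if pvRc ant ((As.zip Bs).drop j) = true then (1 : Int) else 0) ++ [1])
            (i + 1) 0 ≠ 0) ↔
          (∃ k : Nat, k < As.length ∧
            ((As.zip Bs).take (k + 1)).foldl (pvStep a0t) true = true ∧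
            pvRc ant ((As.zip Bs).drop (k + 1)) = true) := by
        rw [pv_exists_range]
        apply exists_congr
        intro k
        constructor
        · rintro ⟨hk, h1, h2⟩
          refine ⟨hk, ?_, ?_⟩
          · rw [pv_read As.length _ k (le_of_lt hk), if_pos hk] at h1
            exact (pv_ne_zero_iff _).mp h1
          · rw [show (k : Int) + 1 = ((k + 1 : Nat) : Int) by push_cast; ring] at h2
            rw [pv_read As.length _ (k + 1) (by omega)] at h2
            by_cases hk1 : k + 1 < As.length
            · rw [if_pos hk1] at h2
              exact (pv_ne_zero_iff _).mp h2
            · have hdropnil : (As.zip Bs).drop (k + 1) = [] :=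
                List.drop_eq_nil_of_le (by omega)
              rw [hdropnil]
              rfl
        · rintro ⟨hk, h1, h2⟩
          refine ⟨hk, ?_, ?_⟩
          · rw [pv_read As.length _ k (le_of_lt hk), if_pos hk]
            exact (pv_ne_zero_iff _).mpr h1
          · rw [show (k : Int) + 1 = ((k + 1 : Nat) : Int) by push_cast; ring]
            rw [pv_read As.length _ (k + 1) (by omega)]
            by_cases hk1 : k + 1 < As.length
            · rw [if_pos hk1]
              exact (pv_ne_zero_iff _).mpr h2
            · rw [if_neg hk1]
              simp
      simp only [hcondiff]
      -- the chain to B's loop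
      have hchain : (∃ k : Nat, k < As.length ∧
          ((As.zip Bs).take (k + 1)).foldl (pvStep a0t) true = true ∧
          pvRc ant ((As.zip Bs).drop (k + 1)) = true) ↔
          altLoop a0t ant (As.zip Bs) false = "YES" := by
        rw [show As.length = (As.zip Bs).length from hPlen.symm]
        rw [pv_idx_append a0t ant (As.zip Bs)]
        rw [pv_main_iff a0t ant hg2 (As.zip Bs) pn hheadP hlastP hpn1]
        exact (altLoop_eq_yes_iff a0t ant hg2 (As.zip Bs) false).symm
      by_cases hex : ∃ k : Nat, k < As.length ∧
          ((As.zip Bs).take (k + 1)).foldl (pvStep a0t) true = true ∧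
          pvRc ant ((As.zip Bs).drop (k + 1)) = true
      · rw [if_pos hex]
        exact (hchain.mp hex).symm
      · rw [if_neg hex]
        rcases altLoop_yes_or_no a0t ant (As.zip Bs) false with hy | hn
        · exact absurd (hchain.mpr hy) hex
        · rw [hn]
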